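-- pv_equiv track=rewrite | github.com/AltTether/memn2n | babi_data_util.py | to_input_data
-- ===== SOURCE A (Python) =====
-- def to_input_data(inputs):
--     return_value = []
--     qa_dataset = []
--     qa_dataset_tmp = []
--     for i, data in enumerate(inputs):
--         sentence_i = i % 15 + 1
--         if sentence_i % 3 != 0:
--             qa_dataset += data
--         else:
--             qa_dataset_tmp += qa_dataset
--             return_value += [(qa_dataset_tmp, data[:len(data)-3], data[len(data)-2:len(data)-1])]
--             qa_dataset_tmp = list()
--         if sentence_i == 15:
--             qa_dataset = list()
--     return return_value
-- ===== SOURCE B (Python) =====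
-- def to_input_data(inputs):
--     out = []
--     rest = inputs
--     while rest:
--         chunk, rest = rest[:15], rest[15:]
--         context = []
--         for j, data in enumerate(chunk):
--             if (j + 1) % 3 != 0:
--                 context += data
--             else:
--                 out.append((list(context), data[:len(data)-3], data[len(data)-2:len(data)-1]))
--     return out
-- ===== Notes on version B (the rewrite author's own statement) =====
-- stated objective: simpler
-- what changed: Replaced A's single flat loop driven by i % 15 arithmetic with three pieces of mutable state by an explicit two-level pass: an outer loop peeling consecutive 15-row chunks and an inner loop over each chunk tracking only a running context, emitting a tuple at every 3rd position.
import Mathlib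
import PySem

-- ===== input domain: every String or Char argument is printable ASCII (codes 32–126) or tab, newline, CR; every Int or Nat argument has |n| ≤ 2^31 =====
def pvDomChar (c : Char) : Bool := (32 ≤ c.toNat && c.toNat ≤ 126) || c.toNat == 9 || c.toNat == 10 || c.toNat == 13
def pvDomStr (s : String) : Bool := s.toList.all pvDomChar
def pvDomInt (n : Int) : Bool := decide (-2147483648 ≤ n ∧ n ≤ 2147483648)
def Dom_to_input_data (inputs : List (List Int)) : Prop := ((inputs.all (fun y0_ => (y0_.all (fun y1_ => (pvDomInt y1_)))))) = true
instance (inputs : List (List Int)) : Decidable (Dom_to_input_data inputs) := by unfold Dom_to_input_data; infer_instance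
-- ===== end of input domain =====

-- B restructures A's flat modulo-driven loop into an explicit two-level pass over 15-row chunks
-- with a per-chunk context (objective: simpler decomposition, same complexity).

-- ===== PORT A =====
-- literal transliteration of A: one fold over enumerate(inputs) with state (return_value, qa_dataset, qa_dataset_tmp)
def to_input_data (inputs : List (List Int)) : List (List Int × List Int × List Int) :=
  ((PySem.List.enumerate inputs 0).foldl
    (fun (st : List (List Int × List Int × List Int) × List Int × List Int) (p : Int × List Int) =>
      let rv := st.1; let qa := st.2.1; let tmp := st.2.2
      let i := p.1; let data := p.2
      let s := PySem.Int.mod i 15 + 1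
      let st' :=
        if PySem.Int.mod s 3 ≠ 0 then (rv, qa ++ data, tmp)
        else
          let tmp2 := tmp ++ qa
          (rv ++ [(tmp2,
                   PySem.List.slice data none (some ((data.length : Int) - 3)),
                   PySem.List.slice data (some ((data.length : Int) - 2)) (some ((data.length : Int) - 1)))],
           qa, ([] : List Int))
      if s = 15 then (st'.1, ([] : List Int), st'.2.2) else st')
    ([], [], [])).1

-- ===== PORT B =====
-- inner for-loop of Source B over one chunk: state (out, context)
def pvChunkFold (chunk : List (List Int)) : (List (List Int × List Int × List Int)) × List Int :=
  (PySem.List.enumerate chunk 0).foldl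
    (fun (st : (List (List Int × List Int × List Int)) × List Int) (p : Int × List Int) =>
      let out := st.1; let ctx := st.2
      let j := p.1; let data := p.2
      if PySem.Int.mod (j + 1) 3 ≠ 0 then (out, ctx ++ data)
      else
        (out ++ [(ctx,
                  PySem.List.slice data none (some ((data.length : Int) - 3)),
                  PySem.List.slice data (some ((data.length : Int) - 2)) (some ((data.length : Int) - 1)))],
         ctx))
    ([], [])

-- the while-loop of Source B: peel a 15-row chunk, process it, recurse on the rest
def to_input_data_alt (inputs : List (List Int)) : List (List Int × List Int × List Int) :=
  match inputs with
  | [] => []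
  | x :: xs => (pvChunkFold (List.take 15 (x :: xs))).1 ++ to_input_data_alt (List.drop 15 (x :: xs))
termination_by inputs.length
decreasing_by simp

-- ===== PRECONDITION & SPEC =====
def Spec_to_input_data (inputs : List (List Int)) (out : List (List Int × List Int × List Int)) : Prop := out = to_input_data_alt inputs
instance (inputs : List (List Int)) (out : List (List Int × List Int × List Int)) : Decidable (Spec_to_input_data inputs out) := by unfold Spec_to_input_data; infer_instance

-- ===== CLAIM (what is proved, stated in full; the proofs are below) =====
def Claim_equal_to_input_data : Prop := ∀ (inputs : List (List Int)), Dom_to_input_data inputs → Spec_to_input_data inputs (to_input_data inputs)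

-- ===== LEMMAS AND PROOFS =====

-- A's loop body, named (identical to the lambda in the port of A)
def stepA (st : List (List Int × List Int × List Int) × List Int × List Int) (p : Int × List Int) :
    List (List Int × List Int × List Int) × List Int × List Int :=
  let rv := st.1; let qa := st.2.1; let tmp := st.2.2
  let i := p.1; let data := p.2
  let s := PySem.Int.mod i 15 + 1
  let st' :=
    if PySem.Int.mod s 3 ≠ 0 then (rv, qa ++ data, tmp)
    else
      let tmp2 := tmp ++ qa
      (rv ++ [(tmp2,
               PySem.List.slice data none (some ((data.length : Int) - 3)),
               PySem.List.slice data (some ((data.length : Int) - 2)) (some ((data.length : Int) - 1)))],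
       qa, ([] : List Int))
  if s = 15 then (st'.1, ([] : List Int), st'.2.2) else st'

-- B's inner loop body, named (identical to the lambda in pvChunkFold)
def stepB (st : (List (List Int × List Int × List Int)) × List Int) (p : Int × List Int) :
    (List (List Int × List Int × List Int)) × List Int :=
  let out := st.1; let ctx := st.2
  let j := p.1; let data := p.2
  if PySem.Int.mod (j + 1) 3 ≠ 0 then (out, ctx ++ data)
  else
    (out ++ [(ctx,
              PySem.List.slice data none (some ((data.length : Int) - 3)),
              PySem.List.slice data (some ((data.length : Int) - 2)) (some ((data.length : Int) - 1)))],
     ctx)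

def goA : Int → List (List Int) → (List (List Int × List Int × List Int) × List Int × List Int) →
    List (List Int × List Int × List Int) × List Int × List Int
  | _, [], st => st
  | i, d :: rest, st => goA (i + 1) rest (stepA st (i, d))

def goB : Int → List (List Int) → ((List (List Int × List Int × List Int)) × List Int) →
    (List (List Int × List Int × List Int)) × List Int
  | _, [], st => st
  | j, d :: rest, st => goB (j + 1) rest (stepB st (j, d))

theorem goA_eq_foldl (xs : List (List Int)) : ∀ (i : Int) st,
    (PySem.List.enumerate xs i).foldl stepA st = goA i xs st := by
  induction xs with
  | nil => intro i st; simp [PySem.List.enumerate_nil, goA]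
  | cons d rest ih => intro i st; simp [PySem.List.enumerate_cons, goA, ih]

theorem goB_eq_foldl (xs : List (List Int)) : ∀ (j : Int) st,
    (PySem.List.enumerate xs j).foldl stepB st = goB j xs st := by
  induction xs with
  | nil => intro j st; simp [PySem.List.enumerate_nil, goB]
  | cons d rest ih => intro j st; simp [PySem.List.enumerate_cons, goB, ih]

theorem to_input_data_eq (inputs : List (List Int)) :
    to_input_data inputs = (goA 0 inputs ([], [], [])).1 := by
  rw [to_input_data, ← goA_eq_foldl]; rfl

theorem pvChunkFold_eq (c : List (List Int)) :
    pvChunkFold c = goB 0 c ([], []) := by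
  rw [pvChunkFold, ← goB_eq_foldl]; rfl

-- evaluation of stepA at absolute index 15*k+j (j < 15) with empty tmp
theorem stepA_eval (k j : Nat) (hj : j < 15) (rv : List (List Int × List Int × List Int))
    (qa : List Int) (d : List Int) :
    stepA (rv, qa, []) (((15 * k + j : Nat) : Int), d) =
      if (j + 1) % 3 ≠ 0 then (rv, qa ++ d, [])
      else
        ((rv ++ [(qa,
             PySem.List.slice d none (some ((d.length : Int) - 3)),
             PySem.List.slice d (some ((d.length : Int) - 2)) (some ((d.length : Int) - 1)))]),
         (if j = 14 then [] else qa), []) := by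
  have h15 : PySem.Int.mod (((15 * k + j : Nat) : Int)) 15 = (j : Int) := by
    rw [PySem.Int.mod_eq_emod_of_pos (by norm_num)]; omega
  have hmod3 : PySem.Int.mod ((j : Int) + 1) 3 = (((j + 1) % 3 : Nat) : Int) := by
    rw [PySem.Int.mod_eq_emod_of_pos (by norm_num)]; push_cast; omega
  have hc : (PySem.Int.mod ((j : Int) + 1) 3 ≠ 0) ↔ ((j + 1) % 3 ≠ 0) := by
    rw [hmod3]; exact_mod_cast Iff.rfl
  have h15eq : ((j : Int) + 1 = 15) ↔ (j = 14) := by omega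
  simp only [stepA, h15]
  by_cases h : (j + 1) % 3 ≠ 0
  · have h14 : j ≠ 14 := by omega
    simp [hc.mpr h, h, h15eq, h14] <;> omega
  · simp only [not_not] at h
    by_cases h14 : j = 14
    · simp [hc, h, h14, h15eq] <;> omega
    · simp [hc, h, h14, h15eq] <;> omega

theorem stepB_eval (j : Nat) (out : List (List Int × List Int × List Int))
    (ctx : List Int) (d : List Int) :
    stepB (out, ctx) ((j : Int), d) =
      if (j + 1) % 3 ≠ 0 then (out, ctx ++ d)
      else
        ((out ++ [(ctx,
             PySem.List.slice d none (some ((d.length : Int) - 3)),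
             PySem.List.slice d (some ((d.length : Int) - 2)) (some ((d.length : Int) - 1)))]),
         ctx) := by
  have hmod3 : PySem.Int.mod ((j : Int) + 1) 3 = (((j + 1) % 3 : Nat) : Int) := by
    rw [PySem.Int.mod_eq_emod_of_pos (by norm_num)]; push_cast; omega
  have hc : (PySem.Int.mod ((j : Int) + 1) 3 ≠ 0) ↔ ((j + 1) % 3 ≠ 0) := by
    rw [hmod3]; exact_mod_cast Iff.rfl
  by_cases h : (j + 1) % 3 ≠ 0
  · simp [stepB, hc.mpr h, h] <;> omega
  · simp only [not_not] at h
    simp [stepB, hc, h] <;> omega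

-- goB's accumulated output splits off
theorem goB_out (c : List (List Int)) : ∀ (j : Int) out ctx,
    goB j c (out, ctx) = (out ++ (goB j c ([], ctx)).1, (goB j c ([], ctx)).2) := by
  induction c with
  | nil => intro j out ctx; simp [goB]
  | cons d rest ih =>
    intro j out ctx
    by_cases h : PySem.Int.mod (j + 1) 3 ≠ 0
    · have hs : ∀ (o : List (List Int × List Int × List Int)),
          stepB (o, ctx) (j, d) = (o, ctx ++ d) := by
        intro o
        show (if PySem.Int.mod (j + 1) 3 ≠ 0 then (o, ctx ++ d) else (o ++ [(ctx,
          PySem.List.slice d none (some ((d.length : Int) - 3)),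
          PySem.List.slice d (some ((d.length : Int) - 2)) (some ((d.length : Int) - 1)))], ctx)) = (o, ctx ++ d)
        rw [if_pos h]
      simp only [goB, hs]
      rw [ih (j+1) out (ctx ++ d), ih (j+1) [] (ctx ++ d)]
    · have hs : ∀ (o : List (List Int × List Int × List Int)),
          stepB (o, ctx) (j, d) = (o ++ [(ctx,
            PySem.List.slice d none (some ((d.length : Int) - 3)),
            PySem.List.slice d (some ((d.length : Int) - 2)) (some ((d.length : Int) - 1)))], ctx) := by
        intro o
        show (if PySem.Int.mod (j + 1) 3 ≠ 0 then (o, ctx ++ d) else (o ++ [(ctx,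
          PySem.List.slice d none (some ((d.length : Int) - 3)),
          PySem.List.slice d (some ((d.length : Int) - 2)) (some ((d.length : Int) - 1)))], ctx)) = _
        rw [if_neg h]
      simp only [goB, hs]
      rw [ih (j+1) (out ++ [_]) ctx]
      simp only [List.nil_append]
      rw [ih (j+1) ([_]) ctx]
      simp

-- index arithmetic helper
theorem idx_succ (k j : Nat) : (((15 * k + j : Nat) : Int)) + 1 = (((15 * k + (j + 1) : Nat) : Int)) := by
  push_cast; ring

-- L2: trailing partial chunk
theorem goA_partial (c : List (List Int)) : ∀ (k j : Nat) rv qa, j + c.length ≤ 15 →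
    (goA (((15 * k + j : Nat) : Int)) c (rv, qa, [])).1 = rv ++ (goB (j : Int) c ([], qa)).1 := by
  induction c with
  | nil => intro k j rv qa _; simp [goA, goB]
  | cons d rest ih =>
    intro k j rv qa hle
    have hj : j < 15 := by simp at hle; omega
    simp only [goA, idx_succ, stepA_eval k j hj]
    have hjb : ((j : Int) + 1) = ((j + 1 : Nat) : Int) := by push_cast; ring
    simp only [goB, stepB_eval, hjb]
    by_cases h : (j + 1) % 3 ≠ 0
    · rw [if_pos h, if_pos h]
      exact ih k (j + 1) rv (qa ++ d) (by simp at hle ⊢; omega)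
    · rw [if_neg h, if_neg h]
      simp only [List.nil_append]
      by_cases h14 : j = 14
      · have hrest : rest = [] := by
          subst h14; simp at hle; exact List.eq_nil_of_length_eq_zero (by omega)
        subst hrest
        simp [h14, goA, goB]
      · rw [if_neg h14]
        rw [ih k (j + 1) (rv ++ [_]) qa (by simp at hle ⊢; omega)]
        rw [goB_out rest ((j + 1 : Nat) : Int) ([_]) qa]
        simp

-- L1: one full chunk, continuation at the next multiple of 15
theorem goA_chunk (c : List (List Int)) : ∀ (k j : Nat) (rest : List (List Int)) rv qa,
    j + c.length = 15 → j < 15 →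
    goA (((15 * k + j : Nat) : Int)) (c ++ rest) (rv, qa, []) =
      goA (((15 * (k + 1) + 0 : Nat) : Int)) rest (rv ++ (goB (j : Int) c ([], qa)).1, [], []) := by
  induction c with
  | nil => intro k j rest rv qa hlen hj; simp at hlen; omega
  | cons d ctail ih =>
    intro k j rest rv qa hlen hj
    simp only [List.cons_append, goA, idx_succ, stepA_eval k j hj]
    have hjb : ((j : Int) + 1) = ((j + 1 : Nat) : Int) := by push_cast; ring
    simp only [goB, stepB_eval, hjb]
    by_cases h : (j + 1) % 3 ≠ 0
    · rw [if_pos h, if_pos h]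
      exact ih k (j + 1) rest rv (qa ++ d) (by simp at hlen ⊢; omega) (by simp at hlen; omega)
    · rw [if_neg h, if_neg h]
      simp only [List.nil_append]
      by_cases h14 : j = 14
      · have hct : ctail = [] := by
          subst h14; simp at hlen; exact List.eq_nil_of_length_eq_zero (by omega)
        subst hct; subst h14
        rw [if_pos rfl]
        simp only [List.nil_append, goA, goB]
        have hidx : (((15 * k + (14 + 1) : Nat) : Int)) = (((15 * (k + 1) + 0 : Nat) : Int)) := by
          push_cast; ring
        rw [hidx]
      · rw [if_neg h14]
        rw [ih k (j + 1) rest (rv ++ [_]) qa (by simp at hlen ⊢; omega) (by simp at hlen; omega)]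
        rw [goB_out ctail ((j + 1 : Nat) : Int) ([_]) qa]
        simp

-- main: A's fold over the whole list = concatenation of B's per-chunk outputs
theorem goA_chunks (n : Nat) : ∀ (xs : List (List Int)) (k : Nat) rv, xs.length ≤ n →
    (goA (((15 * k + 0 : Nat) : Int)) xs (rv, [], [])).1 = rv ++ to_input_data_alt xs := by
  induction n with
  | zero =>
    intro xs k rv hlen
    have : xs = [] := List.eq_nil_of_length_eq_zero (by omega)
    subst this; simp [goA, to_input_data_alt]
  | succ n ih =>
    intro xs k rv hlen
    match xs with
    | [] => simp [goA, to_input_data_alt]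
    | x :: tail =>
      by_cases hlong : 15 ≤ (x :: tail).length
      · have hsplit : x :: tail = List.take 15 (x :: tail) ++ List.drop 15 (x :: tail) := by
          simp
        have htk : (List.take 15 (x :: tail)).length = 15 := by
          have h1 : (x :: tail).length = tail.length + 1 := rfl
          have h3 : (List.take 15 (x :: tail)).length = min 15 (x :: tail).length := by simp; omega
          omega
        conv_lhs => rw [hsplit]
        rw [goA_chunk (List.take 15 (x :: tail)) k 0 (List.drop 15 (x :: tail)) rv [] (by rw [htk]) (by omega)]
        rw [ih (List.drop 15 (x :: tail)) (k + 1) _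
          (by
            have h2 : (List.drop 15 (x :: tail)).length = (x :: tail).length - 15 := by simp
            have h1 : (x :: tail).length = tail.length + 1 := rfl
            omega)]
        have halt : to_input_data_alt (x :: tail) =
            (pvChunkFold (List.take 15 (x :: tail))).1 ++ to_input_data_alt (List.drop 15 (x :: tail)) := by
          rw [to_input_data_alt.eq_def]
        rw [halt, pvChunkFold_eq]
        simp
      · have hshort : (x :: tail).length < 15 := Nat.lt_of_not_le hlong
        rw [goA_partial (x :: tail) k 0 rv [] (by omega)]
        have halt : to_input_data_alt (x :: tail) =
            (pvChunkFold (List.take 15 (x :: tail))).1 ++ to_input_data_alt (List.drop 15 (x :: tail)) := by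
          rw [to_input_data_alt.eq_def]
        have hdrop : List.drop 15 (x :: tail) = [] := List.drop_eq_nil_of_le (by omega)
        rw [halt, pvChunkFold_eq, List.take_of_length_le (by omega), hdrop]
        have hnil : to_input_data_alt [] = [] := by rw [to_input_data_alt.eq_def]
        rw [hnil]
        simp

-- ===== VERDICT (by name: the statement is the Claim_ definition above) =====
theorem to_input_data_spec : Claim_equal_to_input_data := by
  intro inputs _
  show to_input_data inputs = to_input_data_alt inputs
  rw [to_input_data_eq]
  have h0 : (0 : Int) = (((15 * 0 + 0 : Nat) : Int)) := by norm_num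
  rw [h0, goA_chunks inputs.length inputs 0 [] (le_refl _)]
  simp
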